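-- pv_equiv track=rewrite | github.com/stylus-diffusion/stylus | stylus/utils/masking.py | get_masks
-- ===== SOURCE A (Python) =====
-- from itertools import product
--
-- def _cross_product_all_keys(data_dict):
--
--     def generate_cross_product_masks(data_dict):
--         result_masks = {}
--         for key, values in data_dict.items():
--             if not values:  # If the list is empty, skip
--                 continue
--             # All possible boolean values for the length of the list
--             all_combinations = list(product([False, True], repeat=len(values)))
--             # Convert each combination to the required format (list of True/False)
--             masks = [list(combination) for combination in all_combinations]
--             result_masks[key] = masks
--         return result_masks
--
--     # Generate masks for each key
--     individual_masks = generate_cross_product_masks(data_dict)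
--
--     # Extract keys and corresponding masks
--     keys = list(individual_masks.keys())
--     mask_lists = [individual_masks[key] for key in keys]
--
--     # Compute the cross product of all mask lists
--     cross_product = list(product(*mask_lists))
--
--     # Format the result as a list of dictionaries
--     formatted_result = []
--     for combination in cross_product:
--         combination_dict = {key: mask for key, mask in zip(keys, combination)}
--         formatted_result.append(combination_dict)
--
--     return formatted_result
--
-- def get_masks(ranked_loras, strategy="one_hot_loras"):
--     if strategy == "one_hot_loras":
--         all_masks = _cross_product_all_keys(ranked_loras)
--         return all_masks
--     elif strategy == "one_hot_concepts":
--         # Filter out concepts with no LoRAs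
--         non_empty_concepts = {
--             k: v
--             for k, v in ranked_loras.items() if len(v) > 0
--         }
--         concept_keys = list(non_empty_concepts.keys())
--         # Generating all combinations of True/False for the non-empty concepts
--         all_combinations = list(
--             product([True, False], repeat=len(concept_keys)))
--         # Convert each combination into a mask
--         masks = []
--         for combination in all_combinations:
--             mask = {
--                 concept: [state] * len(ranked_loras[concept])
--                 for concept, state in zip(concept_keys, combination)
--             }
--             masks.append(mask)
--         return masks
--     elif strategy == 'all':
--         # return one mask, which is all LoRAs.
--         return [{
--             concept: [True] * len(ranked_loras[concept])
--             for concept in ranked_loras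
--         }]
--     else:
--         raise ValueError(f"Unknown strategy: {strategy}")
-- ===== SOURCE B (Python) =====
-- from itertools import product
--
--
-- def get_masks(ranked_loras, strategy="one_hot_loras"):
--     if strategy == "one_hot_loras":
--         # Flat decomposition: one product over the total number of booleans,
--         # sliced back into consecutive per-key segments.
--         items = [(k, len(v)) for k, v in ranked_loras.items() if v]
--         total = sum(n for _, n in items)
--         result = []
--         for flat in product([False, True], repeat=total):
--             mask = {}
--             pos = 0
--             for k, n in items:
--                 mask[k] = list(flat[pos:pos + n])
--                 pos += n
--             result.append(mask)
--         return result
--     elif strategy == "one_hot_concepts":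
--         keys = [k for k, v in ranked_loras.items() if v]
--         return [
--             {c: [s] * len(ranked_loras[c]) for c, s in zip(keys, comb)}
--             for comb in product([True, False], repeat=len(keys))
--         ]
--     elif strategy == "all":
--         return [{k: [True] * len(v) for k, v in ranked_loras.items()}]
--     else:
--         raise ValueError(f"Unknown strategy: {strategy}")
-- ===== Notes on version B (the rewrite author's own statement) =====
-- stated objective: alternative
-- what changed: The one_hot_loras branch replaces A's per-key mask-list dict plus nested cross product (product(*mask_lists)) by a single flat product([False, True], repeat=total_bits) whose tuples are sliced into consecutive per-key segments; the other branches become direct comprehensions.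
import Mathlib
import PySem

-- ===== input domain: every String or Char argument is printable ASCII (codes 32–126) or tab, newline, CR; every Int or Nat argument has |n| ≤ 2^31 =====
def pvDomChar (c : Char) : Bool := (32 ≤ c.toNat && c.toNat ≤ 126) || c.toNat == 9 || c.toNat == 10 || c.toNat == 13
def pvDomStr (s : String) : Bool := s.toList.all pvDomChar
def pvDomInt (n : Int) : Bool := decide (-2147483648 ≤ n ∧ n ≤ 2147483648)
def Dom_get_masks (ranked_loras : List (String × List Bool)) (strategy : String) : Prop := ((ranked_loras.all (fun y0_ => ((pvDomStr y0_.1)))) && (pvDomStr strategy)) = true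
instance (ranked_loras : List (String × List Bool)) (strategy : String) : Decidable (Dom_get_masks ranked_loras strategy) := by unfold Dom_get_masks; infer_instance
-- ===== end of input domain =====

-- B replaces A's per-key mask lists + nested cross product by ONE flat product over the
-- total number of booleans, sliced back into consecutive per-key segments (alternative decomposition).

-- ===== PORT A =====
-- itertools.product([False, True], repeat=n), in CPython's order
def boolTuples : Nat → List (List Bool)
  | 0 => [[]]
  | n + 1 => [false, true].flatMap (fun b => (boolTuples n).map (fun t => b :: t))

-- itertools.product([True, False], repeat=n), in CPython's order
def tfTuples : Nat → List (List Bool)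
  | 0 => [[]]
  | n + 1 => [true, false].flatMap (fun b => (tfTuples n).map (fun t => b :: t))

-- itertools.product(*mask_lists), in CPython's order
def prodLists : List (List (List Bool)) → List (List (List Bool))
  | [] => [[]]
  | l :: ls => l.flatMap (fun x => (prodLists ls).map (fun c => x :: c))

def get_masks (ranked_loras : List (String × List Bool)) (strategy : String) : List (List (String × List Bool)) :=
  if strategy = "one_hot_loras" then
    -- generate_cross_product_masks: 'if not values: continue', else masks for this key
    -- ('[list(c) for c in all_combinations]' is the identity map on the product's tuples)
    let individual : PySem.Dict String (List (List Bool)) :=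
      ranked_loras.foldl
        (fun d kv => if kv.2 = [] then d
         else d.insert kv.1 ((boolTuples kv.2.length).map (fun c => c)))
        PySem.Dict.empty
    let keys := individual.keys
    let mask_lists := keys.map (fun k => individual.getD k [])
    let cross := prodLists mask_lists
    cross.foldl (fun acc comb => acc ++ [keys.zip comb]) []
  else if strategy = "one_hot_concepts" then
    let d := PySem.Dict.mk ranked_loras
    let non_empty := ranked_loras.filter (fun kv => 0 < kv.2.length)
    let concept_keys := non_empty.map (fun kv => kv.1)
    let all_combinations := tfTuples concept_keys.length
    all_combinations.foldl
      (fun acc comb =>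
        acc ++ [(concept_keys.zip comb).map
                  (fun cs => (cs.1, List.replicate ((d.getD cs.1 []).length) cs.2))])
      []
  else if strategy = "all" then
    [ranked_loras.map
      (fun kv => (kv.1, List.replicate (((PySem.Dict.mk ranked_loras).getD kv.1 []).length) true))]
  else []  -- Python raises ValueError here: excluded by Pre_

-- ===== PORT B =====
-- slice the flat tuple into consecutive per-key segments
def segMask : List (String × Nat) → List Bool → List (String × List Bool)
  | [], _ => []
  | (k, n) :: rest, flat => (k, flat.take n) :: segMask rest (flat.drop n)

def get_masks_alt (ranked_loras : List (String × List Bool)) (strategy : String) : List (List (String × List Bool)) :=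
  if strategy = "one_hot_loras" then
    let items := (ranked_loras.filter (fun kv => ¬ kv.2 = [])).map (fun kv => (kv.1, kv.2.length))
    let total := (items.map (fun p => p.2)).sum
    (boolTuples total).map (fun flat => segMask items flat)
  else if strategy = "one_hot_concepts" then
    let keys := (ranked_loras.filter (fun kv => ¬ kv.2 = [])).map (fun kv => kv.1)
    (tfTuples keys.length).map
      (fun comb => (keys.zip comb).map
        (fun cs => (cs.1, List.replicate (((PySem.Dict.mk ranked_loras).getD cs.1 []).length) cs.2)))
  else if strategy = "all" then
    [ranked_loras.map (fun kv => (kv.1, List.replicate kv.2.length true))]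
  else []  -- Python raises ValueError here: excluded by Pre_

-- ===== PRECONDITION & SPEC =====
-- Pre_ excludes assoc lists with duplicate keys (the Python parameter is a dict, whose
-- assoc-list image has distinct keys; on duplicates the dict collapses them and the list
-- representation is ambiguous) and unknown strategies, on which A raises ValueError.
def Pre_get_masks (ranked_loras : List (String × List Bool)) (strategy : String) : Prop :=
  (ranked_loras.map Prod.fst).Nodup ∧
  (strategy = "one_hot_loras" ∨ strategy = "one_hot_concepts" ∨ strategy = "all")
instance (ranked_loras : List (String × List Bool)) (strategy : String) : Decidable (Pre_get_masks ranked_loras strategy) := by unfold Pre_get_masks; infer_instance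

def pvWitness_get_masks : (List (String × List Bool)) × String :=
  ([("a", [true]), ("b", [false, true]), ("c", [])], "one_hot_loras")

def Spec_get_masks (ranked_loras : List (String × List Bool)) (strategy : String) (out : List (List (String × List Bool))) : Prop := out = get_masks_alt ranked_loras strategy
instance (ranked_loras : List (String × List Bool)) (strategy : String) (out : List (List (String × List Bool))) : Decidable (Spec_get_masks ranked_loras strategy out) := by unfold Spec_get_masks; infer_instance

-- ===== CLAIM (what is proved, stated in full; the proofs are below) =====
def Claim_equal_get_masks : Prop := ∀ (ranked_loras : List (String × List Bool)) (strategy : String), Dom_get_masks ranked_loras strategy → Pre_get_masks ranked_loras strategy → Spec_get_masks ranked_loras strategy (get_masks ranked_loras strategy)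

-- ===== LEMMAS AND PROOFS =====

lemma length_mem_boolTuples : ∀ n, ∀ t ∈ boolTuples n, t.length = n := by
  intro n
  induction n with
  | zero => intro t ht; simp [boolTuples] at ht; simp [ht]
  | succ n ih =>
    intro t ht
    simp [boolTuples] at ht
    rcases ht with ⟨a, ha, rfl⟩ | ⟨a, ha, rfl⟩ <;> simp [ih a ha]

lemma boolTuples_add (m n : Nat) :
    boolTuples (m + n) = (boolTuples m).flatMap (fun a => (boolTuples n).map (fun t => a ++ t)) := by
  induction m with
  | zero => simp [boolTuples]
  | succ m ih =>
    have : m + 1 + n = (m + n) + 1 := by omega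
    rw [this]
    simp [boolTuples, ih, List.flatMap_map, List.map_flatMap, List.map_map, Function.comp_def]

lemma core_flat (its : List (String × Nat)) :
    (prodLists (its.map (fun p => boolTuples p.2))).map
        (fun comb => (its.map (fun p => p.1)).zip comb)
      = (boolTuples ((its.map (fun p => p.2)).sum)).map (segMask its) := by
  induction its with
  | nil => simp [prodLists, boolTuples, segMask]
  | cons p its ih =>
    obtain ⟨k, n⟩ := p
    simp only [List.map_cons, prodLists, List.sum_cons, boolTuples_add]
    rw [List.map_flatMap, List.map_flatMap]
    apply List.flatMap_congr
    intro a ha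
    have hlen : a.length = n := length_mem_boolTuples n a ha
    calc (List.map (fun c => a :: c) (prodLists (List.map (fun p => boolTuples p.2) its))).map
            (fun comb => ((k :: its.map (fun p => p.1)).zip comb))
        = ((prodLists (List.map (fun p => boolTuples p.2) its)).map
            (fun comb => (its.map (fun p => p.1)).zip comb)).map (fun r => (k, a) :: r) := by
          simp [List.map_map, Function.comp]
      _ = ((boolTuples ((its.map (fun p => p.2)).sum)).map (segMask its)).map
            (fun r => (k, a) :: r) := by rw [ih]
      _ = (boolTuples ((its.map (fun p => p.2)).sum)).map
            (fun t => segMask ((k, n) :: its) (a ++ t)) := by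
          simp only [List.map_map]
          apply List.map_congr_left
          intro t _
          simp [segMask, hlen, List.take_left', List.drop_left']
      _ = (List.map (fun t => a ++ t)
            (boolTuples ((its.map (fun p => p.2)).sum))).map (segMask ((k, n) :: its)) := by
          simp [List.map_map, Function.comp_def]

lemma filter_keys_nodup (rl : List (String × List Bool)) (hnd : (rl.map Prod.fst).Nodup) :
    ((rl.filter (fun kv => ¬ kv.2 = [])).map (fun kv : String × List Bool => kv.1)).Nodup :=
  ((List.filter_sublist).map Prod.fst).nodup hnd

lemma getD_mk_of_mem (rl : List (String × List Bool)) (hnd : (rl.map Prod.fst).Nodup)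
    (kv : String × List Bool) (hkv : kv ∈ rl) :
    (PySem.Dict.mk rl).getD kv.1 [] = kv.2 := by
  apply PySem.Dict.getD_of_mem_items
  · exact hkv
  · simpa using hnd

lemma loras_branch (rl : List (String × List Bool)) (hnd : (rl.map Prod.fst).Nodup) :
    (let individual : PySem.Dict String (List (List Bool)) :=
      rl.foldl (fun d kv => if kv.2 = [] then d
         else d.insert kv.1 ((boolTuples kv.2.length).map (fun c => c))) PySem.Dict.empty
     let keys := individual.keys
     let mask_lists := keys.map (fun k => individual.getD k [])
     let cross := prodLists mask_lists
     cross.foldl (fun acc comb => acc ++ [keys.zip comb]) [])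
    = (let items := (rl.filter (fun kv => ¬ kv.2 = [])).map (fun kv => (kv.1, kv.2.length))
       let total := (items.map (fun p => p.2)).sum
       (boolTuples total).map (fun flat => segMask items flat)) := by
  simp only []
  set fl := rl.filter (fun kv => ¬ kv.2 = []) with hfl
  have hnd' : (fl.map (fun kv : String × List Bool => kv.1)).Nodup := filter_keys_nodup rl hnd
  have hswap : rl.foldl (fun d kv => if kv.2 = [] then d
        else d.insert kv.1 ((boolTuples kv.2.length).map (fun c => c))) PySem.Dict.empty
      = rl.foldl (fun d kv => if ¬ kv.2 = [] then
          d.insert kv.1 ((boolTuples kv.2.length).map (fun c => c)) else d) PySem.Dict.empty := by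
    apply PySem.List.foldl_congr_mem
    intro d kv _
    by_cases h : kv.2 = [] <;> simp [h]
  rw [hswap, PySem.List.foldl_ite_eq_foldl_filter]
  have hitems : (fl.foldl (fun d kv =>
        d.insert kv.1 ((boolTuples kv.2.length).map (fun c => c))) PySem.Dict.empty).items
      = fl.map (fun kv => (kv.1, (boolTuples kv.2.length).map (fun c => c))) := by
    have := PySem.Dict.items_foldl_insert_fresh (l := fl) (d := PySem.Dict.empty)
      (k := fun kv : String × List Bool => kv.1)
      (v := fun kv => (boolTuples kv.2.length).map (fun c => c))
      (by intro a _; simp [PySem.Dict.contains_empty]) hnd'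
    simpa [PySem.Dict.empty] using this
  set d := fl.foldl (fun d kv =>
    d.insert kv.1 ((boolTuples kv.2.length).map (fun c => c))) PySem.Dict.empty with hd
  have hkeys : d.keys = fl.map (fun kv => kv.1) := by
    simp [PySem.Dict.keys, hitems, List.map_map, Function.comp_def]
  have hndk : d.keys.Nodup := by rw [hkeys]; exact hnd'
  have hvals : d.keys.map (fun k => d.getD k []) = d.items.map (fun p => p.2) := by
    have := PySem.Dict.values_eq_map_keys d hndk []
    simpa [PySem.Dict.values] using this.symm
  rw [PySem.List.foldl_append_singleton_eq_map, hvals, hitems, hkeys]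
  simp only [List.map_map, Function.comp_def, List.nil_append]
  have := core_flat (fl.map (fun kv => (kv.1, kv.2.length)))
  simpa [List.map_map, Function.comp_def] using this

-- ===== VERDICT (by name: the statement is the Claim_ definition above) =====
theorem get_masks_spec : Claim_equal_get_masks := by
  intro rl s _ hpre
  obtain ⟨hnd, hs⟩ := hpre
  unfold Spec_get_masks get_masks get_masks_alt
  rcases hs with rfl | rfl | rfl
  · -- one_hot_loras
    simp only [String.reduceEq, reduceIte]
    exact loras_branch rl hnd
  · -- one_hot_concepts
    simp only [String.reduceEq, reduceIte]
    rw [PySem.List.foldl_append_singleton_eq_map, List.nil_append]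
    have hfilter : rl.filter (fun kv => 0 < kv.2.length) = rl.filter (fun kv => ¬ kv.2 = []) := by
      apply List.filter_congr
      intro kv _
      cases kv.2 <;> simp
    rw [hfilter]
  · -- all
    simp only [String.reduceEq, reduceIte]
    congr 1
    apply List.map_congr_left
    intro kv hkv
    rw [getD_mk_of_mem rl hnd kv hkv]
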